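-- pv_equiv track=rewrite | github.com/jonathondouglasyager-debug/Research | _System/timeline_integrator.py | _get_date_range
-- ===== SOURCE A (Python) =====
-- from typing import Dict, List
--
-- def _get_date_range(events: List[Dict]) -> Dict:
--     """Get earliest and latest dates in timeline"""
--     if not events:
--         return {"earliest": None, "latest": None}
--
--     dates = [e.get('date') for e in events if e.get('date')]
--     if not dates:
--         return {"earliest": None, "latest": None}
--
--     return {
--         "earliest": min(dates),
--         "latest": max(dates)
--     }
-- ===== SOURCE B (Python) =====
-- from typing import Dict, List
--
-- def _get_date_range(events: List[Dict]) -> Dict: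
--     """Get earliest and latest dates in timeline (single pass, no intermediate list)."""
--     earliest = None
--     latest = None
--     for e in events:
--         d = e.get('date')
--         if d:
--             if earliest is None or d < earliest:
--                 earliest = d
--             if latest is None or latest < d:
--                 latest = d
--     return {"earliest": earliest, "latest": latest}
-- ===== Notes on version B (the rewrite author's own statement) =====
-- stated objective: alternative
-- what changed: Replaces A's build-a-filtered-list-then-two-scans (min and max) with a single fold over the events that maintains running earliest/latest accumulators, with no intermediate list and no emptiness guards.
import Mathlib
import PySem

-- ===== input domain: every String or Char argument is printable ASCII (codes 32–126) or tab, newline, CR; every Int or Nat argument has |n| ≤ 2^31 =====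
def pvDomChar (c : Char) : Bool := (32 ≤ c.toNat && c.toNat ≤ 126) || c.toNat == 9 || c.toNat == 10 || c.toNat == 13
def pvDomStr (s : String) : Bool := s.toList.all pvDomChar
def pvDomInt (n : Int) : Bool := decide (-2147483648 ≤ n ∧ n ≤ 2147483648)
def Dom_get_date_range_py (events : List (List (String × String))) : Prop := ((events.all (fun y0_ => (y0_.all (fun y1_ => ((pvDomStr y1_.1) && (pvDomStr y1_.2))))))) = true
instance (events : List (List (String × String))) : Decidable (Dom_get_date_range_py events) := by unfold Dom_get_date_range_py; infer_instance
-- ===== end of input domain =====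

-- B replaces A's filtered-list-then-min/max with a single fold keeping running earliest/latest accumulators (alternative decomposition, same O(n)).


-- ===== PORT A =====
-- e.get(k) on a Python dict ported as first-match lookup in the association list (exact: a real dict has unique keys)
def pvGet (e : List (String × String)) (k : String) : Option String :=
  (e.find? (fun p => p.1 == k)).map (·.2)

-- Python truthiness of e.get('date') : non-None and non-empty string
def pvTruthy (o : Option String) : Bool :=
  match o with
  | some s => !(s == "")
  | none => false

def get_date_range_py (events : List (List (String × String))) : List (String × Option String) :=
  if events = [] then [("earliest", none), ("latest", none)]
  else
    let dates := (events.filter (fun e => pvTruthy (pvGet e "date"))).map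
      (fun e => (pvGet e "date").getD "")
    if dates = [] then [("earliest", none), ("latest", none)]
    else [("earliest", PySem.List.min? dates (fun x => x)),
          ("latest", PySem.List.max? dates (fun x => x))]

-- ===== PORT B =====
def pvStepB (st : Option String × Option String) (e : List (String × String)) :
    Option String × Option String :=
  match pvGet e "date" with
  | some d =>
      if d == "" then st
      else
        ((match st.1 with
          | none => some d
          | some lo => if d < lo then some d else some lo),
         (match st.2 with
          | none => some d
          | some hi => if hi < d then some d else some hi))
  | none => st

def get_date_range_py_alt (events : List (List (String × String))) : List (String × Option String) :=
  let st := events.foldl pvStepB (none, none)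
  [("earliest", st.1), ("latest", st.2)]

-- ===== PRECONDITION & SPEC =====
def Spec_get_date_range_py (events : List (List (String × String))) (out : List (String × Option String)) : Prop := out = get_date_range_py_alt events
instance (events : List (List (String × String))) (out : List (String × Option String)) : Decidable (Spec_get_date_range_py events out) := by unfold Spec_get_date_range_py; infer_instance

-- ===== CLAIM (what is proved, stated in full; the proofs are below) =====
def Claim_equal_get_date_range_py : Prop := ∀ (events : List (List (String × String))), Dom_get_date_range_py events → Spec_get_date_range_py events (get_date_range_py events)

-- ===== LEMMAS AND PROOFS =====

theorem min?_append_singleton (acc : List String) (d : String) :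
    PySem.List.min? (acc ++ [d]) (fun x => x) =
      match PySem.List.min? acc (fun x => x) with
      | none => some d
      | some lo => if d < lo then some d else some lo := by
  cases acc with
  | nil => simp [PySem.List.min?]
  | cons x t =>
      rw [List.cons_append, PySem.List.min?_id_cons, PySem.List.min?_id_cons,
        List.foldl_append]
      simp only [List.foldl]
      rw [min_def]
      split_ifs with h1 h2 h2
      · exact absurd h1 (not_le_of_gt h2)
      · rfl
      · rfl
      · exact absurd (le_of_not_gt h2) h1

theorem max?_append_singleton (acc : List String) (d : String) :
    PySem.List.max? (acc ++ [d]) (fun x => x) =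
      match PySem.List.max? acc (fun x => x) with
      | none => some d
      | some hi => if hi < d then some d else some hi := by
  cases acc with
  | nil => simp [PySem.List.max?]
  | cons x t =>
      rw [List.cons_append, PySem.List.max?_id_cons, PySem.List.max?_id_cons,
        List.foldl_append]
      simp only [List.foldl]
      rw [max_def]
      split_ifs with h1 h2 h2
      · rfl
      · exact congrArg some (le_antisymm h1 (not_lt.mp h2)).symm
      · exact absurd (le_of_lt h2) h1
      · rfl

-- the fold of B computes (min, max) of the dates list of A
theorem stepB_invariant (events : List (List (String × String))) (acc : List String) :
    events.foldl pvStepB (PySem.List.min? acc (fun x => x), PySem.List.max? acc (fun x => x)) =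
      (PySem.List.min? (acc ++ (events.filter (fun e => pvTruthy (pvGet e "date"))).map
          (fun e => (pvGet e "date").getD "")) (fun x => x),
       PySem.List.max? (acc ++ (events.filter (fun e => pvTruthy (pvGet e "date"))).map
          (fun e => (pvGet e "date").getD "")) (fun x => x)) := by
  induction events generalizing acc with
  | nil => simp
  | cons e es ih =>
      simp only [List.foldl, List.filter_cons]
      cases hg : pvGet e "date" with
      | none =>
          simp only [pvTruthy, pvStepB, hg]
          exact ih acc
      | some d =>
          by_cases hd : d = ""
          · subst hd
            simp only [pvTruthy, pvStepB, hg]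
            exact ih acc
          · simp only [pvTruthy, pvStepB, hg, if_neg (show ¬ (d == "") = true by simp [hd]),
              if_pos (show (!(d == "")) = true by simp [hd]), List.map_cons, Option.getD_some]
            have := ih (acc ++ [d])
            rw [min?_append_singleton, max?_append_singleton] at this
            simp only [List.append_assoc, List.singleton_append] at this
            exact this

-- ===== VERDICT (by name: the statement is the Claim_ definition above) =====
theorem get_date_range_py_spec : Claim_equal_get_date_range_py := by
  intro events _
  unfold Spec_get_date_range_py get_date_range_py get_date_range_py_alt
  have h := stepB_invariant events []
  simp only [List.nil_append] at h
  rw [show ((none, none) : Option String × Option String) =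
      (PySem.List.min? ([] : List String) (fun x => x),
       PySem.List.max? ([] : List String) (fun x => x)) from rfl, h]
  by_cases h1 : events = []
  · subst h1; rfl
  · rw [if_neg h1]
    by_cases h2 : (events.filter (fun e => pvTruthy (pvGet e "date"))).map
        (fun e => (pvGet e "date").getD "") = []
    · simp only [h2]
      rfl
    · simp only [h2]
      simp
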